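-- pv_equiv track=rewrite | github.com/netskopeoss/ta_cloud_exchange_plugins | crowdstrike_ngsiem_cls/main.py | _filter_events
-- ===== SOURCE A (Python) =====
-- def _filter_events(events: list) -> tuple:
--     """Filter the raw data and returns the filtered data.
--
--     Args:
--         events (list): List of events.
--
--     Returns:
--         tuple: skipped_logs_empty, skipped_logs_timestamp, data
--     """
--     skipped_logs_timestamp = 0
--     skipped_logs_empty = 0
--     data = []
--     for event in events:
--         if event:
--             if event.get("timestamp"):
--                 data.append(event)
--             else:
--                 skipped_logs_timestamp += 1
--         else:
--             skipped_logs_empty += 1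
--
--     return skipped_logs_empty, skipped_logs_timestamp, data
-- ===== SOURCE B (Python) =====
-- def _filter_events(events: list) -> tuple:
--     """Classify each event once into a tag vector, then derive all outputs from the tags."""
--     tags = [0 if not e else (2 if e.get("timestamp") else 1) for e in events]
--     data = [e for e, t in zip(events, tags) if t == 2]
--     return tags.count(0), tags.count(1), data
-- ===== Notes on version B (the rewrite author's own statement) =====
-- stated objective: alternative
-- what changed: Replaces A's single stateful three-way counting loop with a classification pipeline: each event is mapped once to a numeric tag, the two skip counts are read off the tag vector with list.count, and data is recovered by zipping events with their tags.
import Mathlib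
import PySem

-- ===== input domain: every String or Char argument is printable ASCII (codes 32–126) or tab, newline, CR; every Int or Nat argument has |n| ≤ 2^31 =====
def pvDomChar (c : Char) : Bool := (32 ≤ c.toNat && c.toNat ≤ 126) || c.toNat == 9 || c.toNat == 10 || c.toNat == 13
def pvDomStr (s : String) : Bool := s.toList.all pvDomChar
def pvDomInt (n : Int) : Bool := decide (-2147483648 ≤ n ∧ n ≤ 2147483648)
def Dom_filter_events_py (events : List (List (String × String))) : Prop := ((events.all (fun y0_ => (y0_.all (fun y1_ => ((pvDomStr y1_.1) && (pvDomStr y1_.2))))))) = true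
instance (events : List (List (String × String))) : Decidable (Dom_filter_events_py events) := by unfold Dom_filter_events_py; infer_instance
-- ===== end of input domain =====

-- B replaces A's single stateful three-way loop with a map-to-tags pipeline (counts via list.count on the tag vector, data via zip); same O(n) cost.

-- truthiness of event.get("timestamp"): the values are strings, so missing key and "" are falsy
def pvTsTruthy (event : List (String × String)) : Bool :=
  ((PySem.Dict.mk event).get? "timestamp").getD "" != ""

-- ===== PORT A =====
-- A's loop over events with state (skipped_logs_empty, skipped_logs_timestamp, data), branches in source order
def filter_events_py (events : List (List (String × String))) : Int × Int × (List (List (String × String))) :=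
  events.foldl
    (fun s event =>
      if event ≠ [] then
        if pvTsTruthy event then (s.1, s.2.1, s.2.2 ++ [event])
        else (s.1, s.2.1 + 1, s.2.2)
      else (s.1 + 1, s.2.1, s.2.2))
    (0, 0, [])

-- ===== PORT B =====
-- tag of one event: 0 = empty, 1 = no truthy timestamp, 2 = kept
def pvTag (e : List (String × String)) : Int :=
  if e = [] then 0 else if pvTsTruthy e then 2 else 1

-- classification pipeline, as in Source B: tag vector, list.count for the counts, zip-filter for data
def filter_events_py_alt (events : List (List (String × String))) : Int × Int × (List (List (String × String))) :=
  let tags := events.map pvTag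
  let data := ((events.zip tags).filter (fun p => p.2 == 2)).map Prod.fst
  ((PySem.List.count tags 0 : Int), (PySem.List.count tags 1 : Int), data)

-- ===== PRECONDITION & SPEC =====
def Spec_filter_events_py (events : List (List (String × String))) (out : Int × Int × (List (List (String × String)))) : Prop := out = filter_events_py_alt events
instance (events : List (List (String × String))) (out : Int × Int × (List (List (String × String)))) : Decidable (Spec_filter_events_py events out) := by unfold Spec_filter_events_py; infer_instance

-- ===== CLAIM (what is proved, stated in full; the proofs are below) =====
def Claim_equal_filter_events_py : Prop := ∀ (events : List (List (String × String))), Dom_filter_events_py events → Spec_filter_events_py events (filter_events_py events)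

-- ===== LEMMAS AND PROOFS =====

-- A's fold from an arbitrary state, characterised in closed form
theorem filter_events_foldl
    (events : List (List (String × String))) (a b : Int) (l : List (List (String × String))) :
    events.foldl
      (fun s event =>
        if event ≠ [] then
          if pvTsTruthy event then (s.1, s.2.1, s.2.2 ++ [event])
          else (s.1, s.2.1 + 1, s.2.2)
        else (s.1 + 1, s.2.1, s.2.2))
      (a, b, l)
    = (a + (events.countP (fun e => e = [])),
       b + (events.countP (fun e => e ≠ [] && !pvTsTruthy e)),
       l ++ events.filter (fun e => e ≠ [] && pvTsTruthy e)) := by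
  induction events generalizing a b l with
  | nil => simp
  | cons e es ih =>
    rw [List.foldl_cons]
    by_cases he : e = []
    · subst he
      simp only [ne_eq, not_true_eq_false, if_false, ih, List.countP_cons, List.filter_cons]
      simp
      omega
    · by_cases ht : pvTsTruthy e
      · simp only [ne_eq, he, not_false_eq_true, if_true, ht, ih, List.countP_cons,
          List.filter_cons, List.append_assoc]
        simp
      · simp only [ne_eq, he, not_false_eq_true, if_true, ht, ih, List.countP_cons,
          List.filter_cons]
        simp
        omega

-- counting a tag value in the tag vector = counting the corresponding predicate on events
theorem count_tag_zero (events : List (List (String × String))) :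
    (events.map pvTag).count 0 = events.countP (fun e => e = []) := by
  induction events with
  | nil => rfl
  | cons e es ih =>
    simp only [List.map_cons, List.count_cons, List.countP_cons, ih, pvTag]
    by_cases he : e = [] <;> by_cases ht : pvTsTruthy e <;> simp [he, ht]

theorem count_tag_one (events : List (List (String × String))) :
    (events.map pvTag).count 1 = events.countP (fun e => e ≠ [] && !pvTsTruthy e) := by
  induction events with
  | nil => rfl
  | cons e es ih =>
    simp only [List.map_cons, List.count_cons, List.countP_cons, ih, pvTag]
    by_cases he : e = [] <;> by_cases ht : pvTsTruthy e <;> simp [he, ht]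

-- the zip-filter-map pass recovers the direct filter
theorem zip_tag_filter (events : List (List (String × String))) :
    (((events.zip (events.map pvTag)).filter (fun p => p.2 == 2)).map Prod.fst)
    = events.filter (fun e => e ≠ [] && pvTsTruthy e) := by
  induction events with
  | nil => rfl
  | cons e es ih =>
    simp only [List.map_cons, List.zip_cons_cons, List.filter_cons]
    by_cases he : e = [] <;> by_cases ht : pvTsTruthy e <;>
      simp [pvTag, he, ht, ih]

-- ===== VERDICT (by name: the statement is the Claim_ definition above) =====
theorem filter_events_py_spec : Claim_equal_filter_events_py := by
  intro events _
  show filter_events_py events = filter_events_py_alt events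
  unfold filter_events_py filter_events_py_alt
  rw [filter_events_foldl]
  simp [PySem.List.count_eq, count_tag_zero, count_tag_one, zip_tag_filter]
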